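-- pv_equiv track=rewrite | github.com/andyjung3504/ai-saju-app | saju_logic.py | get_jami_data
-- ===== SOURCE A (Python) =====
-- BRANCHES = ['子', '丑', '寅', '卯', '辰', '巳', '午', '未', '申', '酉', '戌', '亥']
--
-- def get_jami_data(lunar_month, time_idx, year_stem, lunar_day):
--     # 명궁 계산
--     myung_idx = (2 + (lunar_month - 1) - time_idx) % 12
--     myung_gung = BRANCHES[myung_idx]
--
--     # 국수 계산
--     stems = ['甲', '乙', '丙', '丁', '戊', '己', '庚', '辛', '壬', '癸']
--     try:
--         y_idx = stems.index(year_stem)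
--     except:
--         y_idx = 0 # 에러 방지용 기본값
--
--     start = (y_idx % 5) * 2 + 2
--     off = myung_idx - 2
--     if off < 0: off += 12
--     m_stem = (start + off) % 10
--
--     code = (m_stem // 2 + myung_idx // 2) % 5
--     guk_map = {0: 4, 1: 2, 2: 6, 3: 5, 4: 3}
--     guk = guk_map[code]
--
--     ziwei_idx = (lunar_day + guk) % 12
--
--     # 별 배치
--     stars = {}
--     stars['자미'] = ziwei_idx
--     stars['천부'] = (2 + 8 - ziwei_idx) % 12
--     stars['천기'] = (ziwei_idx - 1) % 12
--     stars['태양'] = (ziwei_idx - 3) % 12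
--     stars['무곡'] = (ziwei_idx - 4) % 12
--     stars['천동'] = (ziwei_idx - 5) % 12
--     stars['염정'] = (ziwei_idx - 8) % 12
--     stars['태음'] = (stars['천부'] + 1) % 12
--     stars['탐랑'] = (stars['천부'] + 2) % 12
--     stars['거문'] = (stars['천부'] + 3) % 12
--     stars['천상'] = (stars['천부'] + 4) % 12
--     stars['천량'] = (stars['천부'] + 5) % 12
--     stars['칠살'] = (stars['천부'] + 6) % 12
--     stars['파군'] = (stars['천부'] + 10) % 12
--
--     my_stars = []
--     for s, i in stars.items():
--         if BRANCHES[i] == myung_gung: my_stars.append(s)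
--
--     if not my_stars:
--         opposite_idx = (myung_idx + 6) % 12
--         op_stars = []
--         for s, i in stars.items():
--             if i == opposite_idx: op_stars.append(s)
--         if op_stars:
--             return myung_gung, f"명무정요(차용): {', '.join(op_stars)}"
--         else:
--             return myung_gung, "(주성 없음)"
--
--     return myung_gung, ", ".join(my_stars)
-- ===== SOURCE B (Python) =====
-- BRANCHES = ['子', '丑', '寅', '卯', '辰', '巳', '午', '未', '申', '酉', '戌', '亥']
--
-- def get_jami_data(lunar_month, time_idx, year_stem, lunar_day):
--     # fate-palace / guk / ziwei arithmetic (unchanged values, branchless off)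
--     myung_idx = (2 + (lunar_month - 1) - time_idx) % 12
--     myung_gung = BRANCHES[myung_idx]
--
--     stems = ['甲', '乙', '丙', '丁', '戊', '己', '庚', '辛', '壬', '癸']
--     y_idx = stems.index(year_stem) if year_stem in stems else 0
--
--     start = (y_idx % 5) * 2 + 2
--     off = (myung_idx - 2) % 12
--     m_stem = (start + off) % 10
--     code = (m_stem // 2 + myung_idx // 2) % 5
--     guk = (4, 2, 6, 5, 3)[code]
--
--     ziwei_idx = (lunar_day + guk) % 12
--     bu = (10 - ziwei_idx) % 12
--
--     star_list = [
--         ('자미', ziwei_idx), ('천부', bu),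
--         ('천기', (ziwei_idx - 1) % 12), ('태양', (ziwei_idx - 3) % 12),
--         ('무곡', (ziwei_idx - 4) % 12), ('천동', (ziwei_idx - 5) % 12),
--         ('염정', (ziwei_idx - 8) % 12),
--         ('태음', (bu + 1) % 12), ('탐랑', (bu + 2) % 12),
--         ('거문', (bu + 3) % 12), ('천상', (bu + 4) % 12),
--         ('천량', (bu + 5) % 12), ('칠살', (bu + 6) % 12),
--         ('파군', (bu + 10) % 12),
--     ]
--
--     # 12 palace buckets; each star goes straight into its palace (no scans)
--     palaces = [[] for _ in range(12)]
--     for name, i in star_list: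
--         palaces[i].append(name)
--
--     my_stars = palaces[myung_idx]
--     if my_stars:
--         return myung_gung, ", ".join(my_stars)
--     op_stars = palaces[(myung_idx + 6) % 12]
--     if op_stars:
--         return myung_gung, f"명무정요(차용): {', '.join(op_stars)}"
--     return myung_gung, "(주성 없음)"
-- ===== Notes on version B (the rewrite author's own statement) =====
-- stated objective: simpler
-- what changed: The name-to-index dict plus the two scanning loops over stars.items() (one comparing BRANCHES[i] to the palace name, one comparing indices against the opposite palace) are replaced by 12 palace buckets filled by direct indexed insertion in one pass over the star list; the answer and the fallback are then plain bucket lookups.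
import Mathlib
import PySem

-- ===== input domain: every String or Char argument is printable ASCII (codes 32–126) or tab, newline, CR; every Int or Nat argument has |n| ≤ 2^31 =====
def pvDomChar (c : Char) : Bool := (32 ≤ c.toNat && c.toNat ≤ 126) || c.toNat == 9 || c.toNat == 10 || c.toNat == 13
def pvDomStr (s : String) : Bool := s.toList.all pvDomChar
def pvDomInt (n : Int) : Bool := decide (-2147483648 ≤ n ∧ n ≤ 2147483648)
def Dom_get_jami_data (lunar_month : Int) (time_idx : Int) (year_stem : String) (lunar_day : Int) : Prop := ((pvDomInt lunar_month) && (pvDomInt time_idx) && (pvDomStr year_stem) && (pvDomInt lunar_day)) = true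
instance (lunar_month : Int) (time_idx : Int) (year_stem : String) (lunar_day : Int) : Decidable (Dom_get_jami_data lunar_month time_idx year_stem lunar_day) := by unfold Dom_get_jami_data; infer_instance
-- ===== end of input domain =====

-- B replaces the star dict plus its two scanning loops by 12 palace buckets filled by
-- direct indexed insertion in one pass; all index arithmetic and output strings are identical.

-- ===== PORT A =====
def pvBranches : List String := ["子", "丑", "寅", "卯", "辰", "巳", "午", "未", "申", "酉", "戌", "亥"]

-- A's code from the computation of myung_gung and the star dict onward (indices are all in [0,12),
-- so the total pyGetD with default "" is exact)
def jamiTailA (myung_idx : Int) (ziwei_idx : Int) : String × String :=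
  let myung_gung := PySem.List.pyGetD pvBranches myung_idx ""
  let stars := PySem.Dict.empty (κ := String) (ν := Int)
  let stars := stars.insert "자미" ziwei_idx
  let stars := stars.insert "천부" (PySem.Int.mod (2 + 8 - ziwei_idx) 12)
  let stars := stars.insert "천기" (PySem.Int.mod (ziwei_idx - 1) 12)
  let stars := stars.insert "태양" (PySem.Int.mod (ziwei_idx - 3) 12)
  let stars := stars.insert "무곡" (PySem.Int.mod (ziwei_idx - 4) 12)
  let stars := stars.insert "천동" (PySem.Int.mod (ziwei_idx - 5) 12)
  let stars := stars.insert "염정" (PySem.Int.mod (ziwei_idx - 8) 12)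
  let bu := stars.getD "천부" 0
  let stars := stars.insert "태음" (PySem.Int.mod (bu + 1) 12)
  let stars := stars.insert "탐랑" (PySem.Int.mod (bu + 2) 12)
  let stars := stars.insert "거문" (PySem.Int.mod (bu + 3) 12)
  let stars := stars.insert "천상" (PySem.Int.mod (bu + 4) 12)
  let stars := stars.insert "천량" (PySem.Int.mod (bu + 5) 12)
  let stars := stars.insert "칠살" (PySem.Int.mod (bu + 6) 12)
  let stars := stars.insert "파군" (PySem.Int.mod (bu + 10) 12)
  let my_stars := stars.items.foldl
    (fun acc p => if PySem.List.pyGetD pvBranches p.2 "" == myung_gung then acc ++ [p.1] else acc) []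
  if my_stars = [] then
    let opposite_idx := PySem.Int.mod (myung_idx + 6) 12
    let op_stars := stars.items.foldl
      (fun acc p => if p.2 == opposite_idx then acc ++ [p.1] else acc) []
    if op_stars ≠ [] then
      (myung_gung, "명무정요(차용): " ++ PySem.Str.join ", " op_stars)
    else
      (myung_gung, "(주성 없음)")
  else
    (myung_gung, PySem.Str.join ", " my_stars)

def get_jami_data (lunar_month : Int) (time_idx : Int) (year_stem : String) (lunar_day : Int) : String × String :=
  let myung_idx := PySem.Int.mod (2 + (lunar_month - 1) - time_idx) 12
  let stems : List String := ["甲", "乙", "丙", "丁", "戊", "己", "庚", "辛", "壬", "癸"]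
  -- try: stems.index(...) except: 0  — index? is none exactly where .index raises ValueError
  let y_idx : Int := match PySem.List.index? stems year_stem with
    | some n => (n : Int)
    | none => 0
  let start := (PySem.Int.mod y_idx 5) * 2 + 2
  let off0 := myung_idx - 2
  let off := if off0 < 0 then off0 + 12 else off0
  let m_stem := PySem.Int.mod (start + off) 10
  let code := PySem.Int.mod (PySem.Int.floordiv m_stem 2 + PySem.Int.floordiv myung_idx 2) 5
  let guk_map := PySem.Dict.ofList [((0 : Int), (4 : Int)), (1, 2), (2, 6), (3, 5), (4, 3)]
  let guk := guk_map.getD code 0   -- code ∈ [0,5): the lookup never misses (no KeyError)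
  let ziwei_idx := PySem.Int.mod (lunar_day + guk) 12
  jamiTailA myung_idx ziwei_idx

-- ===== PORT B =====
-- B's code from myung_gung onward: one pass over the star list into 12 palace buckets
def jamiTailB (myung_idx : Int) (ziwei_idx : Int) : String × String :=
  let myung_gung := PySem.List.pyGetD pvBranches myung_idx ""
  let bu := PySem.Int.mod (10 - ziwei_idx) 12
  let star_list : List (String × Int) :=
    [("자미", ziwei_idx), ("천부", bu),
     ("천기", PySem.Int.mod (ziwei_idx - 1) 12), ("태양", PySem.Int.mod (ziwei_idx - 3) 12),
     ("무곡", PySem.Int.mod (ziwei_idx - 4) 12), ("천동", PySem.Int.mod (ziwei_idx - 5) 12),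
     ("염정", PySem.Int.mod (ziwei_idx - 8) 12),
     ("태음", PySem.Int.mod (bu + 1) 12), ("탐랑", PySem.Int.mod (bu + 2) 12),
     ("거문", PySem.Int.mod (bu + 3) 12), ("천상", PySem.Int.mod (bu + 4) 12),
     ("천량", PySem.Int.mod (bu + 5) 12), ("칠살", PySem.Int.mod (bu + 6) 12),
     ("파군", PySem.Int.mod (bu + 10) 12)]
  let palaces := star_list.foldl
    (fun p q => PySem.List.pySetD p q.2 (PySem.List.pyGetD p q.2 [] ++ [q.1]))
    (List.replicate 12 ([] : List String))
  let my_stars := PySem.List.pyGetD palaces myung_idx []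
  if my_stars ≠ [] then
    (myung_gung, PySem.Str.join ", " my_stars)
  else
    let op_stars := PySem.List.pyGetD palaces (PySem.Int.mod (myung_idx + 6) 12) []
    if op_stars ≠ [] then
      (myung_gung, "명무정요(차용): " ++ PySem.Str.join ", " op_stars)
    else
      (myung_gung, "(주성 없음)")

def get_jami_data_alt (lunar_month : Int) (time_idx : Int) (year_stem : String) (lunar_day : Int) : String × String :=
  let myung_idx := PySem.Int.mod (2 + (lunar_month - 1) - time_idx) 12
  let stems : List String := ["甲", "乙", "丙", "丁", "戊", "己", "庚", "辛", "壬", "癸"]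
  let y_idx : Int := if stems.contains year_stem then (((PySem.List.index? stems year_stem).getD 0 : Nat) : Int) else 0
  let start := (PySem.Int.mod y_idx 5) * 2 + 2
  let off := PySem.Int.mod (myung_idx - 2) 12
  let m_stem := PySem.Int.mod (start + off) 10
  let code := PySem.Int.mod (PySem.Int.floordiv m_stem 2 + PySem.Int.floordiv myung_idx 2) 5
  let guk := PySem.List.pyGetD ([4, 2, 6, 5, 3] : List Int) code 0   -- code ∈ [0,5): in range
  let ziwei_idx := PySem.Int.mod (lunar_day + guk) 12
  jamiTailB myung_idx ziwei_idx

-- ===== PRECONDITION & SPEC =====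
def Spec_get_jami_data (lunar_month : Int) (time_idx : Int) (year_stem : String) (lunar_day : Int) (out : String × String) : Prop := out = get_jami_data_alt lunar_month time_idx year_stem lunar_day
instance (lunar_month : Int) (time_idx : Int) (year_stem : String) (lunar_day : Int) (out : String × String) : Decidable (Spec_get_jami_data lunar_month time_idx year_stem lunar_day out) := by unfold Spec_get_jami_data; infer_instance

-- ===== CLAIM (what is proved, stated in full; the proofs are below) =====
def Claim_equal_get_jami_data : Prop := ∀ (lunar_month : Int) (time_idx : Int) (year_stem : String) (lunar_day : Int), Dom_get_jami_data lunar_month time_idx year_stem lunar_day → Spec_get_jami_data lunar_month time_idx year_stem lunar_day (get_jami_data lunar_month time_idx year_stem lunar_day)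

-- ===== LEMMAS AND PROOFS =====

-- the try/except-.index default and the membership-guarded .index give the same y_idx
lemma yidx_eq (xs : List String) (v : String) :
    (match PySem.List.index? xs v with | some n => (n : Int) | none => 0)
      = (if xs.contains v then (((PySem.List.index? xs v).getD 0 : Nat) : Int) else 0) := by
  rcases h : PySem.List.index? xs v with _ | n
  · have hnv : v ∉ xs := (PySem.List.index?_eq_none_iff xs v).mp h
    simp [hnv]
  · have hv : v ∈ xs := (PySem.List.index?_isSome_iff xs v).mp (h ▸ rfl)
    simp [hv]

-- A's branchy negative-offset fixup equals B's single mod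
lemma off_eq (m : Int) (h0 : 0 ≤ m) (h1 : m < 12) :
    (if m - 2 < 0 then m - 2 + 12 else m - 2) = PySem.Int.mod (m - 2) 12 := by
  rw [PySem.Int.mod_eq_emod_of_pos (by norm_num)]
  split_ifs <;> omega

-- A's guk dict lookup equals B's tuple indexing for code ∈ [0,5)
lemma guk_eq (c : Int) (h0 : 0 ≤ c) (h1 : c < 5) :
    (PySem.Dict.ofList [((0 : Int), (4 : Int)), (1, 2), (2, 6), (3, 5), (4, 3)]).getD c 0
      = PySem.List.pyGetD ([4, 2, 6, 5, 3] : List Int) c 0 := by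
  interval_cases c <;> decide

-- the two tails agree on every pair of in-range indices (144 concrete cases)
set_option maxRecDepth 100000 in
lemma tailAB_fin : ∀ a b : Fin 12, jamiTailA ((a : Nat) : Int) ((b : Nat) : Int) = jamiTailB ((a : Nat) : Int) ((b : Nat) : Int) := by
  decide

lemma tailAB (m z : Int) (hm0 : 0 ≤ m) (hm1 : m < 12) (hz0 : 0 ≤ z) (hz1 : z < 12) :
    jamiTailA m z = jamiTailB m z := by
  have h := tailAB_fin ⟨m.toNat, by omega⟩ ⟨z.toNat, by omega⟩
  simpa [Int.toNat_of_nonneg hm0, Int.toNat_of_nonneg hz0] using h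

-- ===== VERDICT (by name: the statement is the Claim_ definition above) =====
theorem get_jami_data_spec : Claim_equal_get_jami_data := by
  intro lunar_month time_idx year_stem lunar_day _
  unfold Spec_get_jami_data
  simp only [get_jami_data, get_jami_data_alt]
  rw [yidx_eq]
  set m := PySem.Int.mod (2 + (lunar_month - 1) - time_idx) 12 with hm
  have hm0 : 0 ≤ m := PySem.Int.mod_nonneg _ (by norm_num)
  have hm1 : m < 12 := PySem.Int.mod_lt _ (by norm_num)
  rw [off_eq m hm0 hm1]
  set c := PySem.Int.mod
      (PySem.Int.floordiv
        (PySem.Int.mod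
          ((PySem.Int.mod (if (["甲", "乙", "丙", "丁", "戊", "己", "庚", "辛", "壬", "癸"] : List String).contains year_stem then (((PySem.List.index? (["甲", "乙", "丙", "丁", "戊", "己", "庚", "辛", "壬", "癸"] : List String) year_stem).getD 0 : Nat) : Int) else 0) 5) * 2 + 2 + PySem.Int.mod (m - 2) 12) 10) 2
        + PySem.Int.floordiv m 2) 5 with hc
  have hc0 : 0 ≤ c := PySem.Int.mod_nonneg _ (by norm_num)
  have hc1 : c < 5 := PySem.Int.mod_lt _ (by norm_num)
  rw [guk_eq c hc0 hc1]
  set z := PySem.Int.mod (lunar_day + PySem.List.pyGetD ([4, 2, 6, 5, 3] : List Int) c 0) 12 with hz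
  have hz0 : 0 ≤ z := PySem.Int.mod_nonneg _ (by norm_num)
  have hz1 : z < 12 := PySem.Int.mod_lt _ (by norm_num)
  exact tailAB m z hm0 hm1 hz0 hz1
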